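-- pv_equiv track=rewrite | github.com/hapdesw/Praktikum-ASA | Praktikum 1/LetsBeGreedyTirany.py | jumlahNilai
-- ===== SOURCE A (Python) =====
-- def jumlahNilai(bilangan):
--     maks1 = 0
--     maks2 = 0
--     maks3 = 0
--     for i in range(len(bilangan)):
--         if (bilangan[i] > maks1):
--             maks3 = maks2
--             maks2 = maks1
--             maks1 = bilangan[i]
--         elif (bilangan[i] > maks2):
--             maks3 = maks2
--             maks2 = bilangan[i]
--         elif (bilangan[i] > maks3):
--             maks3 = bilangan[i]
--     jumlah = maks1 + maks2 + maks3
--     return jumlah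
-- ===== SOURCE B (Python) =====
-- def jumlahNilai(bilangan):
--     return sum(sorted(bilangan + [0, 0, 0])[-3:])
-- ===== Notes on version B (the rewrite author's own statement) =====
-- stated objective: simpler
-- what changed: Replaces the hand-rolled single-pass top-3 tracking cascade with a one-liner that sorts the list padded with three zeros and sums the last three elements.
import Mathlib
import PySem

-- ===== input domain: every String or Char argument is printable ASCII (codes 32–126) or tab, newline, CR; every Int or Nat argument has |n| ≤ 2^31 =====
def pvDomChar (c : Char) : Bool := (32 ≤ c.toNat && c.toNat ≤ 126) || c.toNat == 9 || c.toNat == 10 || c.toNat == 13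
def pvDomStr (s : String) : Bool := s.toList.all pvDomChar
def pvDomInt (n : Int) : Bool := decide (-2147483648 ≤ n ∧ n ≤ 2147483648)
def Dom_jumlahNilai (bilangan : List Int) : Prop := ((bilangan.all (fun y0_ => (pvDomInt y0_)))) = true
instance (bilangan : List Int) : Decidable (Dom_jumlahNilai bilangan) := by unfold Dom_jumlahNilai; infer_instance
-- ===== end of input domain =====

-- B replaces A's hand-rolled single-pass top-3 tracking cascade by sorting the
-- zero-padded list and summing its last three elements (simpler, not faster).


-- ===== PORT A =====
-- one step of A's loop body on the state (maks1, maks2, maks3)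
def jnStep (s : Int × Int × Int) (x : Int) : Int × Int × Int :=
  if s.1 < x then (x, s.1, s.2.1)
  else if s.2.1 < x then (s.1, x, s.2.1)
  else if s.2.2 < x then (s.1, s.2.1, x)
  else s

def jumlahNilai (bilangan : List Int) : Int :=
  let st := (PySem.List.pyRange 0 (PySem.List.len bilangan) 1).foldl
    (fun s i => jnStep s (PySem.List.pyGetD bilangan i 0)) (0, 0, 0)
  st.1 + st.2.1 + st.2.2

-- ===== PORT B =====
def jumlahNilai_alt (bilangan : List Int) : Int :=
  (PySem.List.slice (PySem.List.sorted (bilangan ++ [0, 0, 0]) (fun x => x) false)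
    (some (-3)) none).sum

-- ===== PRECONDITION & SPEC =====
def Spec_jumlahNilai (bilangan : List Int) (out : Int) : Prop := out = jumlahNilai_alt bilangan
instance (bilangan : List Int) (out : Int) : Decidable (Spec_jumlahNilai bilangan out) := by unfold Spec_jumlahNilai; infer_instance

-- ===== CLAIM (what is proved, stated in full; the proofs are below) =====
def Claim_equal_jumlahNilai : Prop := ∀ (bilangan : List Int), Dom_jumlahNilai bilangan → Spec_jumlahNilai bilangan (jumlahNilai bilangan)

-- ===== LEMMAS AND PROOFS =====

-- Invariant of A's loop: after folding l, the state is a descending triple with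
-- 0 ≤ maks3, and 0::0::0::l is a permutation of the triple plus a remainder
-- whose elements are all ≤ maks3.
theorem jnFold_inv (l : List Int) :
    ∃ rest : List Int,
      (((0:Int) :: 0 :: 0 :: l).Perm
        ((l.foldl jnStep (0,0,0)).1 :: (l.foldl jnStep (0,0,0)).2.1 ::
          (l.foldl jnStep (0,0,0)).2.2 :: rest)) ∧
      (l.foldl jnStep (0,0,0)).2.1 ≤ (l.foldl jnStep (0,0,0)).1 ∧
      (l.foldl jnStep (0,0,0)).2.2 ≤ (l.foldl jnStep (0,0,0)).2.1 ∧
      (∀ r ∈ rest, r ≤ (l.foldl jnStep (0,0,0)).2.2) := by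
  induction l using List.reverseRecOn with
  | nil => exact ⟨[], List.Perm.refl _, le_refl _, le_refl _, by simp⟩
  | append_singleton l x ih =>
    obtain ⟨rest, hperm, h12, h23, hrest⟩ := ih
    rw [List.foldl_append]
    set s := l.foldl jnStep (0,0,0) with hs
    have hperm' : ((0:Int) :: 0 :: 0 :: (l ++ [x])).Perm
        (x :: s.1 :: s.2.1 :: s.2.2 :: rest) := by
      have e1 : ((0:Int) :: 0 :: 0 :: (l ++ [x])) = (((0:Int) :: 0 :: 0 :: l) ++ [x]) := by
        simp
      rw [e1]
      exact (List.perm_append_comm).trans (hperm.cons x)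
    have hstep : List.foldl jnStep s [x] = jnStep s x := by
      simp [List.foldl]
    rw [hstep]
    unfold jnStep
    by_cases h1 : s.1 < x
    · rw [if_pos h1]
      dsimp only
      refine ⟨s.2.2 :: rest, hperm', le_of_lt h1, h12, ?_⟩
      intro r hr
      rcases List.mem_cons.mp hr with rfl | hr
      · exact h23
      · exact le_trans (hrest r hr) h23
    · rw [if_neg h1]
      by_cases h2 : s.2.1 < x
      · rw [if_pos h2]
        dsimp only
        refine ⟨s.2.2 :: rest, hperm'.trans (List.Perm.swap _ _ _), by omega, le_of_lt h2, ?_⟩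
        intro r hr
        rcases List.mem_cons.mp hr with rfl | hr
        · omega
        · have := hrest r hr; omega
      · rw [if_neg h2]
        by_cases h3 : s.2.2 < x
        · rw [if_pos h3]
          dsimp only
          refine ⟨s.2.2 :: rest,
            hperm'.trans ((List.Perm.swap _ _ _).trans
              (List.Perm.cons _ (List.Perm.swap _ _ _))), h12, by omega, ?_⟩
          intro r hr
          rcases List.mem_cons.mp hr with rfl | hr
          · omega
          · have := hrest r hr; omega
        · rw [if_neg h3]
          refine ⟨x :: rest,
            hperm'.trans ((List.Perm.swap _ _ _).trans
              (List.Perm.cons _ ((List.Perm.swap _ _ _).trans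
                (List.Perm.cons _ (List.Perm.swap _ _ _))))), h12, h23, ?_⟩
          intro r hr
          rcases List.mem_cons.mp hr with rfl | hr
          · omega
          · exact hrest r hr

theorem jumlahNilai_eq_alt (l : List Int) : jumlahNilai l = jumlahNilai_alt l := by
  obtain ⟨rest, hperm, h12, h23, hrest⟩ := jnFold_inv l
  set s := l.foldl jnStep (0,0,0) with hs
  have hA : jumlahNilai l = s.1 + s.2.1 + s.2.2 := by
    unfold jumlahNilai
    rw [PySem.List.foldl_pyRange_zero_pyGetD l (0:Int)
      (fun s x => jnStep s x) ((0:Int),(0:Int),(0:Int))]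
  -- the sorted padded list ends in [maks3, maks2, maks1]
  have hsorted : PySem.List.sorted (l ++ [0, 0, 0]) (fun x => x) false
      = PySem.List.sorted rest (fun x => x) false ++ [s.2.2, s.2.1, s.1] := by
    apply PySem.List.sorted_id_eq_of_perm_of_pairwise
    · have p1 : (PySem.List.sorted rest (fun x => x) false ++ [s.2.2, s.2.1, s.1]).Perm
          (rest ++ [s.2.2, s.2.1, s.1]) :=
        (PySem.List.sorted_perm rest _ _).append_right _
      have p2 : (rest ++ [s.2.2, s.2.1, s.1]).Perm (s.2.2 :: s.2.1 :: s.1 :: rest) :=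
        List.perm_append_comm
      have p3 : (s.2.2 :: s.2.1 :: s.1 :: rest).Perm (s.1 :: s.2.1 :: s.2.2 :: rest) :=
        (List.Perm.swap _ _ _).trans
          ((List.Perm.cons _ (List.Perm.swap _ _ _)).trans (List.Perm.swap _ _ _))
      have p5 : ((0:Int) :: 0 :: 0 :: l).Perm (l ++ [0, 0, 0]) := by
        have : ((0:Int) :: 0 :: 0 :: l) = ([0, 0, 0] ++ l : List Int) := by simp
        rw [this]
        exact List.perm_append_comm
      exact p1.trans (p2.trans (p3.trans (hperm.symm.trans p5)))
    · rw [List.pairwise_append]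
      refine ⟨PySem.List.sorted_pairwise rest (fun x => x), ?_, ?_⟩
      · refine List.Pairwise.cons ?_ (List.Pairwise.cons ?_ (List.pairwise_singleton _ _))
        · intro y hy
          simp only [List.mem_cons, List.not_mem_nil, or_false] at hy
          rcases hy with rfl | rfl <;> omega
        · intro y hy
          simp only [List.mem_cons, List.not_mem_nil, or_false] at hy
          subst hy; omega
      · intro a ha b hb
        have ha' : a ∈ rest := (PySem.List.mem_sorted _ _ _ _).1 ha
        have := hrest a ha'
        simp at hb
        rcases hb with rfl | rfl | rfl <;> omega
  have hlen : (PySem.List.sorted rest (fun x => x) false).length = rest.length :=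
    PySem.List.length_sorted _ _ _
  unfold jumlahNilai_alt
  rw [hsorted, PySem.List.slice_from_neg_ofNat _ 3 (by omega)]
  rw [List.length_append, hlen]
  rw [show rest.length + ([s.2.2, s.2.1, s.1] : List Int).length - 3 = rest.length from by simp,
    ← hlen, List.drop_left]
  rw [hA]
  simp [List.sum]
  ring

-- ===== VERDICT (by name: the statement is the Claim_ definition above) =====
theorem jumlahNilai_spec : Claim_equal_jumlahNilai := by
  intro bilangan _
  unfold Spec_jumlahNilai
  exact jumlahNilai_eq_alt bilangan
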